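-- pv_equiv track=rewrite | github.com/chenliangguang81-eng/xiaoban-agent | engines/proactive_sharing_engine.py | generate_parent_proactive_message
-- ===== SOURCE A (Python) =====
-- from typing import Dict, List, Optional, Tuple
--
-- def generate_parent_proactive_message(
--
--     alerts: List[Dict],
--     student_name: str = "小可爱"
-- ) -> str:
--     """
--     生成家长主动推送消息
--
--     将技术性的 alert 列表转化为家长可读的自然语言消息。
--     体现 Mythos 的 Proactive Information Sharing 原则。
--
--     Args:
--         alerts: 需要推送的提醒列表
--         student_name: 学生姓名
--
--     Returns:
--         格式化的家长推送消息
--     """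
--     if not alerts:
--         return ""
--
--     critical_alerts = [a for a in alerts if a.get("priority") == "critical"]
--     high_alerts = [a for a in alerts if a.get("priority") == "high"]
--     medium_alerts = [a for a in alerts if a.get("priority") == "medium"]
--
--     message_parts = [f"Lion，小伴有{len(alerts)}条信息想主动告诉您：\n"]
--
--     if critical_alerts:
--         message_parts.append("🔴 **紧急关注**")
--         for alert in critical_alerts[:2]:
--             message_parts.append(f"• {alert['title']}")
--             message_parts.append(f"  建议行动：{alert['action']}")
--
--     if high_alerts:
--         message_parts.append("\n🟡 **重要提醒**")
--         for alert in high_alerts[:2]: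
--             message_parts.append(f"• {alert['title']}")
--             message_parts.append(f"  建议行动：{alert['action']}")
--
--     if medium_alerts:
--         message_parts.append("\n🟢 **一般关注**")
--         for alert in medium_alerts[:2]:
--             message_parts.append(f"• {alert['title']}")
--
--     message_parts.append(
--         f"\n以上信息由小伴主动整理，供您参考。"
--         f"如需了解详情，随时告诉我。"
--     )
--
--     return "\n".join(message_parts)
-- ===== SOURCE B (Python) =====
-- def generate_parent_proactive_message(alerts, student_name="小可爱"):
--     if not alerts:
--         return ""
--
--     # sort-then-scan: stable-sort the relevant alerts by priority rank, then emit
--     # everything in ONE linear scan, printing a header whenever the rank changes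
--     # and at most two bullets per rank.
--     rank = {"critical": 0, "high": 1, "medium": 2}
--     headers = ["🔴 **紧急关注**", "\n🟡 **重要提醒**", "\n🟢 **一般关注**"]
--
--     kept = sorted((a for a in alerts if a.get("priority") in rank),
--                   key=lambda a: rank[a.get("priority")])
--
--     out = [f"Lion，小伴有{len(alerts)}条信息想主动告诉您：\n"]
--     prev = -1
--     count = 0
--     for a in kept:
--         r = rank[a.get("priority")]
--         if r != prev:
--             out.append(headers[r])
--             prev, count = r, 0
--         if count < 2:
--             out.append(f"• {a['title']}")
--             if r < 2:
--                 out.append(f"  建议行动：{a['action']}")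
--             count += 1
--     out.append("\n以上信息由小伴主动整理，供您参考。如需了解详情，随时告诉我。")
--     return "\n".join(out)
-- ===== Notes on version B (the rewrite author's own statement) =====
-- stated objective: alternative
-- what changed: Replaces A's three filter passes and three copy-pasted if-blocks by a stable sort of the relevant alerts on a priority rank followed by a single linear scan that emits a header whenever the rank changes and at most two bullets per rank.
import Mathlib
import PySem

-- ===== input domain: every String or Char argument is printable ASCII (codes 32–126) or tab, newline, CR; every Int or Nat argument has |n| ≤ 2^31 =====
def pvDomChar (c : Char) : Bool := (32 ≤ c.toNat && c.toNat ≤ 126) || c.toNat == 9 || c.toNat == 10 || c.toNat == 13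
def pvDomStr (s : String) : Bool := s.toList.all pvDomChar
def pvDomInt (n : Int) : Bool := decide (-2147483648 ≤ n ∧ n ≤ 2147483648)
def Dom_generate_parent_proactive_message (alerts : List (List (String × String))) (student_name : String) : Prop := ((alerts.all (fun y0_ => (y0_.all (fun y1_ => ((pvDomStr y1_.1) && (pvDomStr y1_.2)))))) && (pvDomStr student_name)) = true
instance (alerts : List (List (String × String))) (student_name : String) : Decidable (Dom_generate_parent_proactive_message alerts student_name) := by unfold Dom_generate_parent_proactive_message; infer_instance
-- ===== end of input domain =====

-- B replaces A's three filter passes + three copy-pasted if-blocks by a stable sort on a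
-- priority rank followed by ONE linear scan emitting headers on rank change (alternative).


-- shared helpers: a.get("priority") == p   and   a['key'] (Pre_ below excludes the KeyError case)
def pvPrio (a : List (String × String)) (p : String) : Bool :=
  (PySem.Dict.mk a).get? "priority" == some p

def pvReq (a : List (String × String)) (k : String) : String :=
  ((PySem.Dict.mk a).get? k).getD ""   -- alert[k]; exact where the key is present (Pre_)

-- ===== PORT A =====
def generate_parent_proactive_message (alerts : List (List (String × String))) (student_name : String) : String :=
  if alerts = [] then "" else
  let critical_alerts := alerts.filter (fun a => pvPrio a "critical")
  let high_alerts := alerts.filter (fun a => pvPrio a "high")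
  let medium_alerts := alerts.filter (fun a => pvPrio a "medium")
  let message_parts : List String :=
    ["Lion，小伴有" ++ PySem.Int.toStr (alerts.length : Int) ++ "条信息想主动告诉您：\n"]
  let message_parts :=
    if critical_alerts = [] then message_parts else
      (critical_alerts.take 2).foldl
        (fun ps a => ps ++ ["• " ++ pvReq a "title", "  建议行动：" ++ pvReq a "action"])
        (message_parts ++ ["🔴 **紧急关注**"])
  let message_parts :=
    if high_alerts = [] then message_parts else
      (high_alerts.take 2).foldl
        (fun ps a => ps ++ ["• " ++ pvReq a "title", "  建议行动：" ++ pvReq a "action"])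
        (message_parts ++ ["\n🟡 **重要提醒**"])
  let message_parts :=
    if medium_alerts = [] then message_parts else
      (medium_alerts.take 2).foldl
        (fun ps a => ps ++ ["• " ++ pvReq a "title"])
        (message_parts ++ ["\n🟢 **一般关注**"])
  let message_parts := message_parts ++ ["\n以上信息由小伴主动整理，供您参考。如需了解详情，随时告诉我。"]
  PySem.Str.join "\n" message_parts

-- ===== PORT B =====
-- rank = {"critical": 0, "high": 1, "medium": 2}
def pvRankDict : PySem.Dict String Int :=
  PySem.Dict.mk [("critical", 0), ("high", 1), ("medium", 2)]

def pvHeaders : List String :=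
  ["🔴 **紧急关注**", "\n🟡 **重要提醒**", "\n🟢 **一般关注**"]

-- rank[a.get("priority")]; exact on the kept alerts, where the key is present
def pvRankOf (a : List (String × String)) : Int :=
  (((PySem.Dict.mk a).get? "priority").bind pvRankDict.get?).getD 3

-- the loop body: state (prev, count, out)
def pvScanStep (st : Int × Int × List String) (a : List (String × String)) :
    Int × Int × List String :=
  let r := pvRankOf a
  let st := if r ≠ st.1 then (r, (0 : Int), st.2.2 ++ [(PySem.List.pyGet? pvHeaders r).getD ""]) else st
  if st.2.1 < 2 then
    (st.1, st.2.1 + 1,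
      st.2.2 ++ (["• " ++ pvReq a "title"] ++ (if r < 2 then ["  建议行动：" ++ pvReq a "action"] else [])))
  else st

def generate_parent_proactive_message_alt (alerts : List (List (String × String))) (student_name : String) : String :=
  if alerts = [] then "" else
  let kept := PySem.List.sorted
    (alerts.filter (fun a => (((PySem.Dict.mk a).get? "priority").bind pvRankDict.get?).isSome))
    pvRankOf false
  let out : List String :=
    ["Lion，小伴有" ++ PySem.Int.toStr (alerts.length : Int) ++ "条信息想主动告诉您：\n"]
  let st := kept.foldl pvScanStep ((-1 : Int), (0 : Int), out)
  let out := st.2.2 ++ ["\n以上信息由小伴主动整理，供您参考。如需了解详情，随时告诉我。"]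
  PySem.Str.join "\n" out

-- ===== PRECONDITION & SPEC =====
-- Pre_ excludes exactly the inputs where Python A raises KeyError: an alert among the first two of
-- a rendered priority bucket missing 'title' (or, for critical/high, 'action').
def Pre_generate_parent_proactive_message (alerts : List (List (String × String))) (student_name : String) : Prop :=
  (∀ a ∈ (alerts.filter (fun a => pvPrio a "critical")).take 2,
      ((PySem.Dict.mk a).get? "title").isSome = true ∧ ((PySem.Dict.mk a).get? "action").isSome = true) ∧
  (∀ a ∈ (alerts.filter (fun a => pvPrio a "high")).take 2,
      ((PySem.Dict.mk a).get? "title").isSome = true ∧ ((PySem.Dict.mk a).get? "action").isSome = true) ∧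
  (∀ a ∈ (alerts.filter (fun a => pvPrio a "medium")).take 2,
      ((PySem.Dict.mk a).get? "title").isSome = true)

instance (alerts : List (List (String × String))) (student_name : String) : Decidable (Pre_generate_parent_proactive_message alerts student_name) := by
  unfold Pre_generate_parent_proactive_message; infer_instance

def pvWitness_generate_parent_proactive_message : (List (List (String × String))) × String :=
  ([[("priority", "high"), ("title", "late homework"), ("action", "check tonight")],
    [("priority", "medium"), ("title", "mood dip")]], "Lion")

def Spec_generate_parent_proactive_message (alerts : List (List (String × String))) (student_name : String) (out : String) : Prop := out = generate_parent_proactive_message_alt alerts student_name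
instance (alerts : List (List (String × String))) (student_name : String) (out : String) : Decidable (Spec_generate_parent_proactive_message alerts student_name out) := by unfold Spec_generate_parent_proactive_message; infer_instance

-- ===== CLAIM (what is proved, stated in full; the proofs are below) =====
def Claim_equal_generate_parent_proactive_message : Prop := ∀ (alerts : List (List (String × String))) (student_name : String), Dom_generate_parent_proactive_message alerts student_name → Pre_generate_parent_proactive_message alerts student_name → Spec_generate_parent_proactive_message alerts student_name (generate_parent_proactive_message alerts student_name)

-- ===== LEMMAS AND PROOFS =====

def pvKept (a : List (String × String)) : Bool :=
  (((PySem.Dict.mk a).get? "priority").bind pvRankDict.get?).isSome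

def pvEmit (r : Int) (a : List (String × String)) : List String :=
  ["• " ++ pvReq a "title"] ++ (if r < 2 then ["  建议行动：" ++ pvReq a "action"] else [])

def pvBlock (r : Int) (g : List (List (String × String))) : List String :=
  if g = [] then [] else
    (PySem.List.pyGet? pvHeaders r).getD "" :: (g.take 2).flatMap (pvEmit r)

theorem pvRank_of_prio (a : List (String × String)) :
    (pvPrio a "critical" → pvRankOf a = 0) ∧ (pvPrio a "high" → pvRankOf a = 1) ∧
    (pvPrio a "medium" → pvRankOf a = 2) := by
  unfold pvPrio pvRankOf
  cases h : (PySem.Dict.mk a).get? "priority" with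
  | none => simp
  | some p =>
    refine ⟨?_, ?_, ?_⟩ <;> intro hp <;> simp at hp <;> subst hp <;> rfl

theorem pvKept_rank (a : List (String × String)) :
    (pvKept a && (pvRankOf a == 0)) = pvPrio a "critical" ∧
    (pvKept a && (pvRankOf a == 1)) = pvPrio a "high" ∧
    (pvKept a && (pvRankOf a == 2)) = pvPrio a "medium" ∧
    (pvKept a → 0 ≤ pvRankOf a ∧ pvRankOf a ≤ 2) := by
  unfold pvKept pvRankOf pvPrio
  cases h : (PySem.Dict.mk a).get? "priority" with
  | none => simp
  | some p =>
    simp only [Option.bind_some]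
    have : pvRankDict.get? p = if p = "critical" then some 0 else if p = "high" then some 1 else if p = "medium" then some 2 else none := by
      unfold pvRankDict
      by_cases h1 : p = "critical" <;> by_cases h2 : p = "high" <;> by_cases h3 : p = "medium" <;>
        simp_all [PySem.Dict.get?] <;> exact ⟨fun h => h1 h.symm, fun h => h2 h.symm, fun h => h3 h.symm⟩
    rw [this]
    by_cases h1 : p = "critical" <;> by_cases h2 : p = "high" <;> by_cases h3 : p = "medium" <;>
      simp_all

theorem insertBy_append {α : Type} (before : α → α → Bool) (x : α) (l1 l2 : List α)
    (h : ∀ y ∈ l1, before x y = false) :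
    PySem.List.insertBy before x (l1 ++ l2) = l1 ++ PySem.List.insertBy before x l2 := by
  induction l1 with
  | nil => simp
  | cons y ys ih =>
    have hy := h y (by simp)
    simp only [List.cons_append, PySem.List.insertBy, hy]
    simp only [Bool.false_eq_true, if_false, List.cons.injEq, true_and]
    exact ih (fun z hz => h z (by simp [hz]))

theorem ins3 {α : Type} (key : α → Int) (x : α) (g0 g1 g2 : List α)
    (h0 : ∀ a ∈ g0, key a = 0) (h1 : ∀ a ∈ g1, key a = 1) (h2 : ∀ a ∈ g2, key a = 2)
    (hx : 0 ≤ key x ∧ key x ≤ 2) :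
    PySem.List.insertBy (fun a b => decide (key a < key b)) x (g0 ++ (g1 ++ g2)) =
      (g0 ++ (if key x = 0 then [x] else [])) ++
      ((g1 ++ (if key x = 1 then [x] else [])) ++ (g2 ++ (if key x = 2 then [x] else []))) := by
  have hk : key x = 0 ∨ key x = 1 ∨ key x = 2 := by omega
  rcases hk with hk | hk | hk
  · rw [insertBy_append _ _ g0 _ (fun y hy => by simp [h0 y hy, hk])]
    simp only [hk]
    norm_num
    cases g1 with
    | cons b bs => simp [PySem.List.insertBy, h1 b (by simp), hk]
    | nil =>
      cases g2 with
      | cons b bs => simp [PySem.List.insertBy, h2 b (by simp), hk]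
      | nil => simp [PySem.List.insertBy]
  · rw [insertBy_append _ _ g0 _ (fun y hy => by simp [h0 y hy, hk]),
        insertBy_append _ _ g1 _ (fun y hy => by simp [h1 y hy, hk])]
    simp only [hk]
    norm_num
    cases g2 with
    | cons b bs => simp [PySem.List.insertBy, h2 b (by simp), hk]
    | nil => simp [PySem.List.insertBy]
  · rw [insertBy_append _ _ g0 _ (fun y hy => by simp [h0 y hy, hk]),
        insertBy_append _ _ g1 _ (fun y hy => by simp [h1 y hy, hk]),
        PySem.List.insertBy_of_forall_not_before _ _ g2 (fun y hy => by simp [h2 y hy, hk])]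
    simp only [hk]
    norm_num

theorem fold3 {α : Type} (key : α → Int) (l : List α) (g0 g1 g2 : List α)
    (hl : ∀ a ∈ l, 0 ≤ key a ∧ key a ≤ 2)
    (h0 : ∀ a ∈ g0, key a = 0) (h1 : ∀ a ∈ g1, key a = 1) (h2 : ∀ a ∈ g2, key a = 2) :
    l.foldl (fun acc x => PySem.List.insertBy (fun a b => decide (key a < key b)) x acc)
        (g0 ++ (g1 ++ g2)) =
      (g0 ++ l.filter (fun a => key a == 0)) ++
      ((g1 ++ l.filter (fun a => key a == 1)) ++ (g2 ++ l.filter (fun a => key a == 2))) := by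
  induction l generalizing g0 g1 g2 with
  | nil => simp
  | cons x t ih =>
    simp only [List.foldl_cons]
    rw [ins3 key x g0 g1 g2 h0 h1 h2 (hl x (by simp))]
    rw [ih _ _ _ (fun a ha => hl a (by simp [ha]))
        (fun a ha => by rcases List.mem_append.mp ha with h | h
                        · exact h0 a h
                        · by_cases hc : key x = 0
                          · simp [hc] at h; subst h; exact hc
                          · simp [hc] at h)
        (fun a ha => by rcases List.mem_append.mp ha with h | h
                        · exact h1 a h
                        · by_cases hc : key x = 1
                          · simp [hc] at h; subst h; exact hc
                          · simp [hc] at h)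
        (fun a ha => by rcases List.mem_append.mp ha with h | h
                        · exact h2 a h
                        · by_cases hc : key x = 2
                          · simp [hc] at h; subst h; exact hc
                          · simp [hc] at h)]
    simp only [List.filter_cons]
    rcases (by have := hl x (by simp); omega : key x = 0 ∨ key x = 1 ∨ key x = 2) with hk | hk | hk <;>
      simp [hk, List.append_assoc]

theorem sorted_kept (alerts : List (List (String × String))) :
    PySem.List.sorted (alerts.filter pvKept) pvRankOf false =
      alerts.filter (fun a => pvPrio a "critical") ++
      (alerts.filter (fun a => pvPrio a "high") ++ alerts.filter (fun a => pvPrio a "medium")) := by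
  rw [PySem.List.sorted_eq_foldl_insertBy]
  have h := fold3 pvRankOf (alerts.filter pvKept) [] [] []
      (fun a ha => (pvKept_rank a).2.2.2 (List.of_mem_filter ha))
      (by simp) (by simp) (by simp)
  simp only [List.nil_append] at h
  rw [h]
  congr 1
  · rw [List.filter_filter]
    exact List.filter_congr (fun a _ => by rw [Bool.and_comm]; exact (pvKept_rank a).1)
  congr 1
  · rw [List.filter_filter]
    exact List.filter_congr (fun a _ => by rw [Bool.and_comm]; exact (pvKept_rank a).2.1)
  · rw [List.filter_filter]
    exact List.filter_congr (fun a _ => by rw [Bool.and_comm]; exact (pvKept_rank a).2.2.1)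

theorem scanS (r : Int) (g : List (List (String × String))) (c : Int) (ps : List String)
    (hg : ∀ a ∈ g, pvRankOf a = r) (hc : 0 ≤ c) :
    ∃ c', g.foldl pvScanStep (r, c, ps) =
      (r, c', ps ++ (g.take (2 - c).toNat).flatMap (pvEmit r)) := by
  induction g generalizing c ps with
  | nil => exact ⟨c, by simp⟩
  | cons a t ih =>
    have ha := hg a (by simp)
    simp only [List.foldl_cons, pvScanStep, ha, ne_eq, not_true_eq_false, if_false]
    by_cases h2 : c < 2
    · simp only [if_pos h2]
      obtain ⟨c', hc'⟩ := ih (c + 1) (ps ++ pvEmit r a) (fun b hb => hg b (by simp [hb])) (by omega)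
      refine ⟨c', ?_⟩
      simp only [pvEmit] at hc'
      rw [hc']
      have htake : (2 - c).toNat = (2 - (c+1)).toNat + 1 := by omega
      rw [htake, List.take_succ_cons]
      simp [pvEmit, List.append_assoc]
    · simp only [if_neg h2]
      obtain ⟨c', hc'⟩ := ih c ps (fun b hb => hg b (by simp [hb])) hc
      refine ⟨c', ?_⟩
      rw [hc']
      have htake : (2 - c).toNat = 0 := by omega
      simp [htake]

theorem scanG (r prev c : Int) (g : List (List (String × String))) (ps : List String)
    (hne : g ≠ []) (hg : ∀ a ∈ g, pvRankOf a = r) (hprev : prev ≠ r) :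
    ∃ c', g.foldl pvScanStep (prev, c, ps) =
      (r, c', ps ++ ((PySem.List.pyGet? pvHeaders r).getD "" ::
                      (g.take 2).flatMap (pvEmit r))) := by
  cases g with
  | nil => exact absurd rfl hne
  | cons a t =>
    have ha := hg a (by simp)
    simp only [List.foldl_cons, pvScanStep, ha, ne_eq]
    rw [if_pos (fun h => hprev h.symm)]
    simp only [if_pos (by decide : (0:Int) < 2)]
    obtain ⟨c', hc'⟩ := scanS r t 1 (ps ++ [(PySem.List.pyGet? pvHeaders r).getD ""] ++ pvEmit r a)
        (fun b hb => hg b (by simp [hb])) (by decide)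
    refine ⟨c', ?_⟩
    simp only [pvEmit] at hc'
    simp only [zero_add]
    rw [show ps ++ [(PySem.List.pyGet? pvHeaders r).getD ""] ++ (["• " ++ pvReq a "title"] ++ if r < 2 then ["  建议行动：" ++ pvReq a "action"] else []) = (ps ++ [(PySem.List.pyGet? pvHeaders r).getD ""]) ++ (["• " ++ pvReq a "title"] ++ if r < 2 then ["  建议行动：" ++ pvReq a "action"] else []) from rfl] at hc'
    rw [hc']
    have : (2 - (1:Int)).toNat = 1 := by decide
    rw [this]
    simp [pvEmit, List.append_assoc]

theorem scanGrp (r prev c : Int) (g : List (List (String × String))) (ps : List String)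
    (hg : ∀ a ∈ g, pvRankOf a = r) (hprev : prev < r) :
    ∃ prev' c', g.foldl pvScanStep (prev, c, ps) = (prev', c', ps ++ pvBlock r g) ∧
      prev ≤ prev' ∧ prev' ≤ r := by
  by_cases hne : g = []
  · exact ⟨prev, c, by simp [hne, pvBlock], le_refl _, le_of_lt hprev⟩
  · obtain ⟨c', hc'⟩ := scanG r prev c g ps hne hg (by omega)
    exact ⟨r, c', by simp [hc', pvBlock, hne], le_of_lt hprev, le_refl _⟩

theorem emit01 (r : Int) (hr : r < 2) (a : List (String × String)) :
    pvEmit r a = ["• " ++ pvReq a "title", "  建议行动：" ++ pvReq a "action"] := by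
  simp [pvEmit, hr]

theorem emit2 (a : List (String × String)) :
    pvEmit 2 a = ["• " ++ pvReq a "title"] := by
  simp [pvEmit]

-- A's per-bucket if/foldl block written as ps ++ pvBlock

theorem Ablock01 (r : Int) (hr0 : r = 0 ∨ r = 1) (g : List (List (String × String)))
    (ps : List String) :
    (if g = [] then ps else
      (g.take 2).foldl
        (fun ps a => ps ++ ["• " ++ pvReq a "title", "  建议行动：" ++ pvReq a "action"])
        (ps ++ [(PySem.List.pyGet? pvHeaders r).getD ""])) = ps ++ pvBlock r g := by
  by_cases hne : g = []
  · simp [hne, pvBlock]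
  · rw [if_neg hne, PySem.List.foldl_append_eq_flatMap]
    have : (g.take 2).flatMap (fun a => ["• " ++ pvReq a "title", "  建议行动：" ++ pvReq a "action"])
        = (g.take 2).flatMap (pvEmit r) := by
      have hf : ∀ a, pvEmit r a = ["• " ++ pvReq a "title", "  建议行动：" ++ pvReq a "action"] :=
        fun a => emit01 r (by omega) a
      exact congrArg (fun fn => List.flatMap fn (g.take 2)) (funext fun a => (hf a).symm)
    simp [pvBlock, hne, this, List.append_assoc]

theorem Ablock2 (g : List (List (String × String))) (ps : List String) :
    (if g = [] then ps else
      (g.take 2).foldl (fun ps a => ps ++ ["• " ++ pvReq a "title"])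
        (ps ++ [(PySem.List.pyGet? pvHeaders 2).getD ""])) = ps ++ pvBlock 2 g := by
  by_cases hne : g = []
  · simp [hne, pvBlock]
  · rw [if_neg hne, PySem.List.foldl_append_eq_flatMap]
    have : (g.take 2).flatMap (fun a => ["• " ++ pvReq a "title"])
        = (g.take 2).flatMap (pvEmit 2) := by
      have hf : ∀ a, pvEmit (2:Int) a = ["• " ++ pvReq a "title"] := emit2
      exact congrArg (fun fn => List.flatMap fn (g.take 2)) (funext fun a => (hf a).symm)
    simp [pvBlock, hne, this, List.append_assoc]

theorem rank_mem_C (alerts : List (List (String × String))) :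
    ∀ a ∈ alerts.filter (fun a => pvPrio a "critical"), pvRankOf a = 0 :=
  fun a ha => (pvRank_of_prio a).1 (List.mem_filter.mp ha).2

theorem rank_mem_H (alerts : List (List (String × String))) :
    ∀ a ∈ alerts.filter (fun a => pvPrio a "high"), pvRankOf a = 1 :=
  fun a ha => (pvRank_of_prio a).2.1 (List.mem_filter.mp ha).2

theorem rank_mem_M (alerts : List (List (String × String))) :
    ∀ a ∈ alerts.filter (fun a => pvPrio a "medium"), pvRankOf a = 2 :=
  fun a ha => (pvRank_of_prio a).2.2 (List.mem_filter.mp ha).2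

theorem generate_parent_proactive_message_eq (alerts : List (List (String × String)))
    (student_name : String) :
    generate_parent_proactive_message alerts student_name
      = generate_parent_proactive_message_alt alerts student_name := by
  unfold generate_parent_proactive_message generate_parent_proactive_message_alt
  by_cases h : alerts = []
  · simp [h]
  · simp only [h, if_false]
    rw [show (alerts.filter (fun a => (((PySem.Dict.mk a).get? "priority").bind pvRankDict.get?).isSome)) = alerts.filter pvKept from rfl]
    rw [sorted_kept]
    rw [List.foldl_append, List.foldl_append]
    obtain ⟨p1, c1, e1, hp1a, hp1b⟩ := scanGrp 0 (-1) 0 (alerts.filter (fun a => pvPrio a "critical"))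
      ["Lion，小伴有" ++ PySem.Int.toStr (alerts.length : Int) ++ "条信息想主动告诉您：\n"]
      (rank_mem_C alerts) (by norm_num)
    rw [e1]
    obtain ⟨p2, c2, e2, hp2a, hp2b⟩ := scanGrp 1 p1 c1 (alerts.filter (fun a => pvPrio a "high")) _
      (rank_mem_H alerts) (by omega)
    rw [e2]
    obtain ⟨p3, c3, e3, hp3a, hp3b⟩ := scanGrp 2 p2 c2 (alerts.filter (fun a => pvPrio a "medium")) _
      (rank_mem_M alerts) (by omega)
    rw [e3]
    rw [show ("🔴 **紧急关注**" : String) = (PySem.List.pyGet? pvHeaders 0).getD "" from rfl,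
        show ("\n🟡 **重要提醒**" : String) = (PySem.List.pyGet? pvHeaders 1).getD "" from rfl,
        show ("\n🟢 **一般关注**" : String) = (PySem.List.pyGet? pvHeaders 2).getD "" from rfl]
    rw [Ablock01 0 (Or.inl rfl), Ablock01 1 (Or.inr rfl), Ablock2]

-- ===== VERDICT (by name: the statement is the Claim_ definition above) =====
theorem generate_parent_proactive_message_spec : Claim_equal_generate_parent_proactive_message := by
  intro alerts student_name _ _
  unfold Spec_generate_parent_proactive_message
  exact generate_parent_proactive_message_eq alerts student_name
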